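-- pv_equiv track=rewrite | github.com/SIG-DEV-GBA/web_scraper_agendades | src/utils/urls.py | is_image_url
-- ===== SOURCE A (Python) =====
-- def is_image_url(url: str | None) -> bool:
--     """Check if URL points to an image.
--
--     Args:
--         url: URL to check
--
--     Returns:
--         True if URL appears to be an image
--     """
--     if not url:
--         return False
--
--     image_extensions = (".jpg", ".jpeg", ".png", ".gif", ".webp", ".svg", ".bmp")
--     url_lower = url.lower()
--
--     # Check extension
--     if any(url_lower.endswith(ext) for ext in image_extensions):
--         return True
--
--     # Check for image in path
--     if any(ext + "?" in url_lower for ext in image_extensions):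
--         return True
--
--     return False
-- ===== SOURCE B (Python) =====
-- def is_image_url(url):
--     """Check if URL points to an image.
--
--     Single left-to-right scan: at each '.' in the lowered URL, test whether the
--     characters after it spell one of the extension bodies and are followed by
--     end-of-string (A's suffix check) or a query separator (A's substring check).
--     """
--     if not url:
--         return False
--     s = url.lower()
--     n = len(s)
--     for i in range(n):
--         if s[i] != '.':
--             continue
--         rest = s[i + 1:]
--         for body in ("jpg", "jpeg", "png", "gif", "webp", "svg", "bmp"):
--             k = len(body)
--             if rest[:k] == body and (k == len(rest) or rest[k] == '?'):
--                 return True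
--     return False
-- ===== Notes on version B (the rewrite author's own statement) =====
-- stated objective: alternative
-- what changed: B replaces A's 14 whole-string scans (endswith per extension, then extension-plus-query-separator substring search per extension) with one positional left-to-right scan of the lowered URL that, at each dot, matches the following characters against the seven extension bodies and requires end-of-string or a query separator after them.
import Mathlib
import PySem

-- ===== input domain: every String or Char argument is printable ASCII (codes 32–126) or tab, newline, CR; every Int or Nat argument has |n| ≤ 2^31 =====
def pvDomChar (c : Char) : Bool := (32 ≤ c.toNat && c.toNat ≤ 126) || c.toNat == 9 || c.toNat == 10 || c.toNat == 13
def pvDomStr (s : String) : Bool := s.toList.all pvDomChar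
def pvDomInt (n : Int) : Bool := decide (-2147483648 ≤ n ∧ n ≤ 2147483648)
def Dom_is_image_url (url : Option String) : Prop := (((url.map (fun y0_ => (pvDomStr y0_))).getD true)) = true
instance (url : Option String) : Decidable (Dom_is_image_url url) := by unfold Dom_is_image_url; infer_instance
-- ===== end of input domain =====

-- B replaces A's per-extension whole-string scans with one positional scan of the
-- lowered URL that matches extension bodies at each dot (alternative algorithm).

-- ===== PORT A =====
def pvImageExts : List String := [".jpg", ".jpeg", ".png", ".gif", ".webp", ".svg", ".bmp"]

def is_image_url (url : Option String) : Bool :=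
  match url with
  | none => false
  | some u =>
    if u = "" then false
    else
      let url_lower := PySem.Str.lower u
      if pvImageExts.any (fun ext => PySem.Str.endswith url_lower ext) then true
      else if pvImageExts.any (fun ext => PySem.Str.isIn (ext ++ "?") url_lower) then true
      else false

-- ===== PORT B =====
-- the extension bodies (without the leading dot), as char lists
def pvBodies : List (List Char) :=
  [['j','p','g'], ['j','p','e','g'], ['p','n','g'], ['g','i','f'],
   ['w','e','b','p'], ['s','v','g'], ['b','m','p']]

-- rest[:k] == body and (k == len(rest) or rest[k] == '?')
def pvMatchAt (body rest : List Char) : Bool :=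
  body.isPrefixOf rest &&
    (match rest.drop body.length with
     | [] => true
     | c :: _ => c == '?')

-- the scan: at each '.', try the seven bodies against the tail
def pvScan : List Char → Bool
  | [] => false
  | c :: rest =>
      (c = '.' && pvBodies.any fun b => pvMatchAt b rest) || pvScan rest

def is_image_url_alt (url : Option String) : Bool :=
  match url with
  | none => false
  | some u =>
    if u = "" then false
    else pvScan (PySem.Str.lower u).toList

-- ===== PRECONDITION & SPEC =====
def Spec_is_image_url (url : Option String) (out : Bool) : Prop := out = is_image_url_alt url
instance (url : Option String) (out : Bool) : Decidable (Spec_is_image_url url out) := by unfold Spec_is_image_url; infer_instance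

-- ===== CLAIM =====
def Claim_equal_is_image_url : Prop := ∀ (url : Option String), Dom_is_image_url url → Spec_is_image_url url (is_image_url url)

-- ===== LEMMAS AND PROOFS =====

-- pvMatchAt b rest holds iff rest is exactly b, or starts with b ++ ['?'].
theorem pvMatchAt_iff (b rest : List Char) :
    pvMatchAt b rest = true ↔ (rest = b ∨ b ++ ['?'] <+: rest) := by
  unfold pvMatchAt
  rw [Bool.and_eq_true, List.isPrefixOf_iff_prefix]
  constructor
  · rintro ⟨⟨t, rfl⟩, h2⟩
    simp only [List.drop_left] at h2
    match t, h2 with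
    | [], _ => exact Or.inl (by simp)
    | c :: t', h2 =>
      right
      have : c = '?' := by simpa using h2
      exact ⟨t', by simp [this]⟩
  · rintro (rfl | ⟨t, rfl⟩)
    · simp
    · refine ⟨⟨'?' :: t, by simp⟩, ?_⟩
      simp

-- the per-extension A-check, unfolded one character
theorem term_cons (b : List Char) (c : Char) (rest : List Char) :
    (PySem.Chars.endswith (c :: rest) ('.' :: b)
      || PySem.Chars.isIn ('.' :: b ++ ['?']) (c :: rest))
    = ((decide (c = '.') && pvMatchAt b rest)
      || (PySem.Chars.endswith rest ('.' :: b)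
          || PySem.Chars.isIn ('.' :: b ++ ['?']) rest)) := by
  rw [Bool.eq_iff_iff]
  simp only [Bool.or_eq_true, Bool.and_eq_true, decide_eq_true_eq,
    PySem.Chars.endswith_iff, PySem.Chars.isIn_iff_infix,
    List.suffix_cons_iff, List.infix_cons_iff, List.cons_append,
    List.cons_prefix_cons, pvMatchAt_iff, List.cons_eq_cons]
  tauto

theorem any_or_split {α : Type} (l : List α) (f g : α → Bool) :
    (l.any fun x => f x || g x) = (l.any f || l.any g) := by
  induction l with
  | nil => rfl
  | cons x t ih => cases hf : f x <;> cases hg : g x <;>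
      simp [List.any_cons, ih, hf, hg]

theorem any_const_and {α : Type} (l : List α) (c : Bool) (f : α → Bool) :
    (l.any fun x => c && f x) = (c && l.any f) := by
  cases c <;> simp

-- the scan computes, for the fixed body list, exactly A's per-extension disjunction
theorem pvScan_eq (l : List Char) :
    pvScan l = pvBodies.any (fun b =>
      PySem.Chars.endswith l ('.' :: b)
        || PySem.Chars.isIn ('.' :: b ++ ['?']) l) := by
  induction l with
  | nil => decide
  | cons c rest ih =>
    rw [List.any_congr rfl (fun b => term_cons b c rest), any_or_split,
      any_const_and, ← ih]
    rfl

-- ===== VERDICT =====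
theorem is_image_url_spec : Claim_equal_is_image_url := by
  intro url _
  unfold Spec_is_image_url is_image_url is_image_url_alt
  match url with
  | none => rfl
  | some u =>
    by_cases hu : u = ""
    · simp [hu]
    · simp only [hu, if_false]
      rw [pvScan_eq, any_or_split]
      have hE : (pvImageExts.any fun ext => PySem.Str.endswith (PySem.Str.lower u) ext)
          = (pvBodies.any fun b => PySem.Chars.endswith (PySem.Str.lower u).toList ('.' :: b)) := by
        simp only [pvImageExts, pvBodies, List.any_cons, List.any_nil,
          PySem.Str.endswith_eq]
        rfl
      have hI : (pvImageExts.any fun ext => PySem.Str.isIn (ext ++ "?") (PySem.Str.lower u))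
          = (pvBodies.any fun b => PySem.Chars.isIn ('.' :: b ++ ['?']) (PySem.Str.lower u).toList) := by
        simp only [pvImageExts, pvBodies, List.any_cons, List.any_nil,
          PySem.Str.isIn_eq, String.toList_append]
        rfl
      rw [← hE, ← hI]
      rcases pvImageExts.any fun ext => PySem.Str.endswith (PySem.Str.lower u) ext with _ | _ <;>
        rcases pvImageExts.any fun ext => PySem.Str.isIn (ext ++ "?") (PySem.Str.lower u) with _ | _ <;>
        rfl
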